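-- pv_equiv track=rewrite | github.com/Okhr/oraculum | core/parsing.py | remove_title
-- ===== SOURCE A (Python) =====
-- def remove_title(text_part: str, title: str) -> str:
--     """Remove, if possible, the text contained in the 'title' parameter from the beginning of the text
--
--     Parameters
--     ----------
--     text_part : str
--         The raw text
--     title : str
--         The portion of text to remove
--
--     Returns
--     -------
--     str
--         Text with title removed
--     """
--     text_part = text_part.strip()
--     title = title.strip()
--
--     while len(title) > 0 and len(text_part) > 0:
--         if text_part[0].lower() == title[0].lower():
--             text_part = text_part[1:].strip()
--             title = title[1:].strip()
--         else:
--             break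
--
--     return text_part
-- ===== SOURCE B (Python) =====
-- def remove_title(text_part: str, title: str) -> str:
--     s = text_part.strip()
--     t = title.strip()
--     n, m = len(s), len(t)
--     i = j = 0
--     while i < n and j < m and s[i].lower() == t[j].lower():
--         i += 1
--         j += 1
--         while i < n and s[i].isspace():
--             i += 1
--         while j < m and t[j].isspace():
--             j += 1
--     return s[i:]
-- ===== Notes on version B (the rewrite author's own statement) =====
-- stated objective: faster
-- what changed: Replaces A's loop that re-slices and re-strips both strings on every matched character (each iteration O(n)) with a single two-pointer pass over the once-stripped strings, advancing indices past whitespace and returning one final slice.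
import Mathlib
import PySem

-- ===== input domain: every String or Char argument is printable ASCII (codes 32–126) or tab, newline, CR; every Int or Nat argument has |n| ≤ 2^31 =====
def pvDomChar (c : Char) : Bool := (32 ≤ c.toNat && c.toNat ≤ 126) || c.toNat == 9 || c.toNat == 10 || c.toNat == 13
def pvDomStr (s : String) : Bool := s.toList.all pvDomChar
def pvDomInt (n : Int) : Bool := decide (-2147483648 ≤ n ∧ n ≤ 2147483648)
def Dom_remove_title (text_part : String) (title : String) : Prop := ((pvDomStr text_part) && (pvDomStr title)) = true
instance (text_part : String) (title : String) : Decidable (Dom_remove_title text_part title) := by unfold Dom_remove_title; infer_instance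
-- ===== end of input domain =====

-- B replaces A's repeated slice-and-strip of both strings by a single two-pointer pass
-- over the two stripped strings (objective: faster, asymptotic).

-- ===== PORT A =====
-- termination helper for the port: stripping never lengthens a string
theorem pvStripLen (s : List Char) : (PySem.Chars.strip s).length ≤ s.length := by
  simp only [PySem.Chars.strip, PySem.Chars.rstrip, PySem.Chars.lstrip, List.length_reverse]
  exact le_trans (List.length_dropWhile_le _ _)
    (by simpa using List.length_dropWhile_le PySem.Chars.isspace s)

-- A's while loop: while both nonempty, compare first chars lowercased; on a match
-- drop the first char of each, strip both again, and continue; else stop.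
def pvLoopA : List Char → List Char → List Char
  | a :: s', b :: t' =>
    if PySem.Chars.lowerChar a = PySem.Chars.lowerChar b then
      pvLoopA (PySem.Chars.strip s') (PySem.Chars.strip t')
    else a :: s'
  | s, _ => s
  termination_by s _ => s.length
  decreasing_by exact Nat.lt_succ_of_le (pvStripLen _)

def remove_title (text_part : String) (title : String) : String :=
  String.ofList (pvLoopA (PySem.Str.strip text_part).toList (PySem.Str.strip title).toList)

-- ===== PORT B =====
-- B's inner while loops: advance the index past whitespace
def pvSkipWs (xs : List Char) (k : Nat) : Nat :=
  if h : k < xs.length then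
    if PySem.Chars.isspace xs[k] then pvSkipWs xs (k + 1) else k
  else k
  termination_by xs.length - k

-- termination helper for pvLoopB: skipping whitespace never moves the index back
theorem pvSkipWs_ge (xs : List Char) (k : Nat) : k ≤ pvSkipWs xs k := by
  unfold pvSkipWs
  split
  · split
    · exact le_trans (Nat.le_succ k) (pvSkipWs_ge xs (k + 1))
    · exact le_rfl
  · exact le_rfl
  termination_by xs.length - k

-- B's outer while loop: two pointers into the fixed stripped strings
def pvLoopB (s t : List Char) (i j : Nat) : List Char :=
  if h : i < s.length then
    if h2 : j < t.length then
      if PySem.Chars.lowerChar s[i] = PySem.Chars.lowerChar t[j] then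
        pvLoopB s t (pvSkipWs s (i + 1)) (pvSkipWs t (j + 1))
      else s.drop i
    else s.drop i
  else s.drop i
  termination_by s.length - i
  decreasing_by have := pvSkipWs_ge s (i + 1); omega

def remove_title_alt (text_part : String) (title : String) : String :=
  String.ofList (pvLoopB (PySem.Str.strip text_part).toList (PySem.Str.strip title).toList 0 0)

-- ===== PRECONDITION & SPEC =====
def Spec_remove_title (text_part : String) (title : String) (out : String) : Prop := out = remove_title_alt text_part title
instance (text_part : String) (title : String) (out : String) : Decidable (Spec_remove_title text_part title out) := by unfold Spec_remove_title; infer_instance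

-- ===== CLAIM (what is proved, stated in full; the proofs are below) =====
def Claim_equal_remove_title : Prop := ∀ (text_part : String) (title : String), Dom_remove_title text_part title → Spec_remove_title text_part title (remove_title text_part title)

-- ===== LEMMAS AND PROOFS =====

theorem pvDW_idem (p : Char → Bool) (l : List Char) :
    List.dropWhile p (List.dropWhile p l) = List.dropWhile p l := by
  rw [List.dropWhile_eq_self_iff]
  intro hl hp
  have h := List.head?_dropWhile_not p l
  rw [List.head?_eq_getElem?, List.getElem?_eq_getElem hl] at h
  simp_all

theorem pvDrop_skipWs (xs : List Char) (k : Nat) :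
    xs.drop (pvSkipWs xs k) = List.dropWhile PySem.Chars.isspace (xs.drop k) := by
  unfold pvSkipWs
  split
  · rename_i h
    rw [List.drop_eq_getElem_cons h]
    split
    · rename_i hsp
      rw [List.dropWhile_cons_of_pos hsp]
      exact pvDrop_skipWs xs (k + 1)
    · rename_i hsp
      rw [List.dropWhile_cons_of_neg hsp, ← List.drop_eq_getElem_cons h]
  · rename_i h
    rw [List.drop_eq_nil_of_le (by omega)]
    simp
  termination_by xs.length - k

-- "no trailing whitespace" is preserved by dropping a prefix
theorem pvRstrip_drop (s : List Char) (k : Nat) (hs : PySem.Chars.rstrip s = s) :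
    PySem.Chars.rstrip (s.drop k) = s.drop k := by
  unfold PySem.Chars.rstrip at *
  rw [List.reverse_eq_iff] at hs ⊢
  rw [List.dropWhile_eq_self_iff] at hs ⊢
  intro hl hp
  have hlen : 0 < s.reverse.length := by
    simp only [List.length_reverse, List.length_drop] at hl ⊢
    omega
  have hg : (s.drop k).reverse[0] = s.reverse[0] := by
    have h3 : (s.drop k).getLast? = s.getLast? := by
      rw [List.getLast?_drop, if_neg]
      simp only [List.length_reverse, List.length_drop] at hl
      omega
    have e : (s.drop k).reverse.head? = s.reverse.head? := by
      rw [List.head?_reverse, List.head?_reverse, h3]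
    rw [List.head?_eq_getElem?, List.head?_eq_getElem?,
      List.getElem?_eq_getElem hl, List.getElem?_eq_getElem hlen] at e
    exact Option.some.inj e
  exact hs hlen (hg ▸ hp)

-- strip output has no trailing whitespace
theorem pvRstrip_strip (s : List Char) :
    PySem.Chars.rstrip (PySem.Chars.strip s) = PySem.Chars.strip s := by
  simp only [PySem.Chars.strip, PySem.Chars.rstrip, List.reverse_reverse]
  rw [pvDW_idem]

-- loop correspondence: A's destructive loop equals B's two-pointer loop
theorem pvAB (s t : List Char) (i j : Nat)
    (hs : PySem.Chars.rstrip s = s) (ht : PySem.Chars.rstrip t = t) :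
    pvLoopA (s.drop i) (t.drop j) = pvLoopB s t i j := by
  unfold pvLoopB
  split
  · rename_i h
    split
    · rename_i h2
      have hdi := List.drop_eq_getElem_cons h
      have hdj := List.drop_eq_getElem_cons h2
      split
      · rename_i heq
        rw [hdi, hdj]
        rw [pvLoopA, if_pos heq]
        have e1 : PySem.Chars.strip (s.drop (i + 1)) = s.drop (pvSkipWs s (i + 1)) := by
          unfold PySem.Chars.strip PySem.Chars.lstrip
          rw [← pvDrop_skipWs]
          exact pvRstrip_drop s _ hs
        have e2 : PySem.Chars.strip (t.drop (j + 1)) = t.drop (pvSkipWs t (j + 1)) := by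
          unfold PySem.Chars.strip PySem.Chars.lstrip
          rw [← pvDrop_skipWs]
          exact pvRstrip_drop t _ ht
        rw [e1, e2]
        exact pvAB s t _ _ hs ht
      · rename_i heq
        rw [hdi, hdj, pvLoopA, if_neg heq, ← hdi]
    · rename_i h2
      rw [List.drop_eq_nil_of_le (le_of_not_gt h2)]
      cases hd : s.drop i with
      | nil => simp [pvLoopA]
      | cons a s' => simp [pvLoopA]
  · rename_i h
    rw [List.drop_eq_nil_of_le (le_of_not_gt h)]
    cases t.drop j with
    | nil => simp [pvLoopA]
    | cons b t' => simp [pvLoopA]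
  termination_by s.length - i
  decreasing_by have := pvSkipWs_ge s (i + 1); omega

-- ===== VERDICT (by name: the statement is the Claim_ definition above) =====
theorem remove_title_spec : Claim_equal_remove_title := by
  intro text_part title _
  simp only [Spec_remove_title, remove_title, remove_title_alt]
  congr 1
  have hs : PySem.Chars.rstrip (PySem.Str.strip text_part).toList = (PySem.Str.strip text_part).toList := by
    rw [PySem.Str.toList_strip]; exact pvRstrip_strip _
  have ht : PySem.Chars.rstrip (PySem.Str.strip title).toList = (PySem.Str.strip title).toList := by
    rw [PySem.Str.toList_strip]; exact pvRstrip_strip _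
  have h := pvAB (PySem.Str.strip text_part).toList (PySem.Str.strip title).toList 0 0 hs ht
  simpa using h
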